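-- pv_equiv track=rewrite | github.com/profbrandongassaway/Map-Kinase | MapKinase_WebApp/3_phosprotnorm_gui_embedded.py | _detect_candidates
-- ===== SOURCE A (Python) =====
-- def _detect_candidates(headers):
--     L = [h.lower() for h in headers]
--     def find_first(patterns):
--         for i, h in enumerate(L):
--             for p in patterns:
--                 if p in h:
--                     return headers[i]
--         return None
--     uniprot = find_first(["uniprot", "uniprot_id", "uniprot id", "accession", "protein accession", "protein id"])
--     gene = find_first(["gene_symbol", "gene symbol", "gene", "genesymbol"])
--     sitepos = find_first(["site position", "position in peptide", "site_position", "siteposition", "position"])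
--     return uniprot, gene, sitepos
-- ===== SOURCE B (Python) =====
-- def _detect_candidates(headers):
--     UNI = ["uniprot", "uniprot_id", "uniprot id", "accession", "protein accession", "protein id"]
--     GENE = ["gene_symbol", "gene symbol", "gene", "genesymbol"]
--     SITE = ["site position", "position in peptide", "site_position", "siteposition", "position"]
--     uniprot = gene = sitepos = None
--     for h in headers:
--         low = h.lower()
--         if uniprot is None and any(p in low for p in UNI):
--             uniprot = h
--         if gene is None and any(p in low for p in GENE):
--             gene = h
--         if sitepos is None and any(p in low for p in SITE):
--             sitepos = h
--         if uniprot is not None and gene is not None and sitepos is not None: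
--             break
--     return uniprot, gene, sitepos
-- ===== Notes on version B (the rewrite author's own statement) =====
-- stated objective: alternative
-- what changed: A makes three independent full scans over the lowered header list (one per field, each re-testing every header); B lowercases each header once during a SINGLE pass that fills three result slots on their first match and breaks early once all three are filled.
import Mathlib
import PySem

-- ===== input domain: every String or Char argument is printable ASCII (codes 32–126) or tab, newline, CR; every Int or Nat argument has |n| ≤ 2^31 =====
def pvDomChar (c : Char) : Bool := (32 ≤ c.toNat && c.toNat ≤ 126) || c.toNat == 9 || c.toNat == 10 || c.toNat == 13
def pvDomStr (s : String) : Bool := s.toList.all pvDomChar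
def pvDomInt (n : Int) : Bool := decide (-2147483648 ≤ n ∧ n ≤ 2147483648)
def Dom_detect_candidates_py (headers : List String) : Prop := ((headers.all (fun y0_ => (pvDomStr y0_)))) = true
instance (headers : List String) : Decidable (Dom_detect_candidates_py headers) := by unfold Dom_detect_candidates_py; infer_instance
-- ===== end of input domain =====

-- B fuses A's three independent scans over the lowered headers into one pass with
-- three result slots and an early break; same return value (objective: alternative).


-- ===== PORT A =====
-- the three pattern lists (literals from A)
def pvPatsU : List String := ["uniprot", "uniprot_id", "uniprot id", "accession", "protein accession", "protein id"]
def pvPatsG : List String := ["gene_symbol", "gene symbol", "gene", "genesymbol"]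
def pvPatsS : List String := ["site position", "position in peptide", "site_position", "siteposition", "position"]

-- `for i, h in enumerate(L): for p in patterns: if p in h: return headers[i]`
def pvFindLoop (headers patterns : List String) : Nat → List String → Option String
  | _, [] => none
  | i, h :: rest =>
    if patterns.any (fun p => PySem.Str.isIn p h) then PySem.List.pyGet? headers (i : Int)
    else pvFindLoop headers patterns (i + 1) rest

-- find_first over L = [h.lower() for h in headers]
def pvFindFirst (headers patterns : List String) : Option String :=
  pvFindLoop headers patterns 0 (headers.map PySem.Str.lower)

def detect_candidates_py (headers : List String) : Option String × Option String × Option String :=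
  (pvFindFirst headers pvPatsU, pvFindFirst headers pvPatsG, pvFindFirst headers pvPatsS)

-- ===== PORT B =====
def pvMatch (pats : List String) (low : String) : Bool :=
  pats.any (fun p => PySem.Str.isIn p low)

-- one pass, three slots, early break once all three are filled
def pvScan (u g s : Option String) : List String → Option String × Option String × Option String
  | [] => (u, g, s)
  | h :: rest =>
    let low := PySem.Str.lower h
    let u' := if u.isNone && pvMatch pvPatsU low then some h else u
    let g' := if g.isNone && pvMatch pvPatsG low then some h else g
    let s' := if s.isNone && pvMatch pvPatsS low then some h else s
    if u'.isSome && g'.isSome && s'.isSome then (u', g', s') else pvScan u' g' s' rest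

def detect_candidates_py_alt (headers : List String) : Option String × Option String × Option String :=
  pvScan none none none headers

-- ===== PRECONDITION & SPEC =====
def Spec_detect_candidates_py (headers : List String) (out : Option String × Option String × Option String) : Prop := out = detect_candidates_py_alt headers
instance (headers : List String) (out : Option String × Option String × Option String) : Decidable (Spec_detect_candidates_py headers out) := by unfold Spec_detect_candidates_py; infer_instance

-- ===== CLAIM (what is proved, stated in full; the proofs are below) =====
def Claim_equal_detect_candidates_py : Prop := ∀ (headers : List String), Dom_detect_candidates_py headers → Spec_detect_candidates_py headers (detect_candidates_py headers)

-- ===== LEMMAS AND PROOFS =====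

-- shared predicate: the header matches one of the patterns after lowering
def pvPred (pats : List String) (h : String) : Bool := pvMatch pats (PySem.Str.lower h)

-- A's loop, started at offset k on the lowered tail, is find? on the tail
theorem pvFindLoop_eq (headers pats : List String) :
    ∀ (tl : List String) (k : Nat), headers.drop k = tl →
      pvFindLoop headers pats k (tl.map PySem.Str.lower) = tl.find? (pvPred pats) := by
  intro tl
  induction tl with
  | nil => intro k _; simp [pvFindLoop]
  | cons h rest ih =>
    intro k hk
    have hget : headers[k]? = some h := by
      rw [← List.head?_drop, hk]; rfl
    have hdrop : headers.drop (k + 1) = rest := by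
      have h1 : headers.drop (k + 1) = (headers.drop k).drop 1 := by
        rw [List.drop_drop]
      rw [h1, hk]; rfl
    by_cases hb : pvPred pats h = true
    · rw [List.find?_cons_of_pos hb]
      simp only [List.map_cons, pvFindLoop]
      rw [if_pos (by simpa [pvPred, pvMatch] using hb), PySem.List.pyGet?_natCast, hget]
    · rw [List.find?_cons_of_neg (by simpa using hb)]
      simp only [List.map_cons, pvFindLoop]
      rw [if_neg (by simpa [pvPred, pvMatch] using hb)]
      exact ih (k + 1) hdrop

theorem pvFindFirst_eq (headers pats : List String) :
    pvFindFirst headers pats = headers.find? (pvPred pats) :=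
  pvFindLoop_eq headers pats headers 0 rfl

-- per-slot step: updating a slot then or-ing the rest = or-ing the whole list
theorem pvSlot (u : Option String) (pats : List String) (h : String) (rest : List String) :
    (if u.isNone && pvMatch pats (PySem.Str.lower h) then some h else u).or
        (rest.find? (pvPred pats)) = u.or (List.find? (pvPred pats) (h :: rest)) := by
  by_cases hp : pvPred pats h = true
  · rw [List.find?_cons_of_pos hp]
    have : pvMatch pats (PySem.Str.lower h) = true := hp
    rw [this]; cases u <;> simp
  · rw [List.find?_cons_of_neg hp]
    have : pvMatch pats (PySem.Str.lower h) = false := by simpa [pvPred] using hp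
    rw [this]; cases u <;> simp

-- once all three slots are filled the scan is constant
theorem pvScan_full (a b c : String) (l : List String) :
    pvScan (some a) (some b) (some c) l = (some a, some b, some c) := by
  cases l with
  | nil => rfl
  | cons h rest => simp [pvScan]

-- B's scan returns each slot or-ed with the first match in the remaining headers
theorem pvScan_eq (l : List String) : ∀ (u g s : Option String),
    pvScan u g s l =
      (u.or (l.find? (pvPred pvPatsU)), g.or (l.find? (pvPred pvPatsG)),
       s.or (l.find? (pvPred pvPatsS))) := by
  induction l with
  | nil => intro u g s; simp [pvScan]
  | cons h rest ih =>
    intro u g s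
    simp only [pvScan]
    set u' := if u.isNone && pvMatch pvPatsU (PySem.Str.lower h) then some h else u with hu'
    set g' := if g.isNone && pvMatch pvPatsG (PySem.Str.lower h) then some h else g with hg'
    set s' := if s.isNone && pvMatch pvPatsS (PySem.Str.lower h) then some h else s with hs'
    have hstep :
        (if u'.isSome && g'.isSome && s'.isSome then (u', g', s') else pvScan u' g' s' rest) =
          (u'.or (rest.find? (pvPred pvPatsU)), g'.or (rest.find? (pvPred pvPatsG)),
           s'.or (rest.find? (pvPred pvPatsS))) := by
      by_cases hall : (u'.isSome && g'.isSome && s'.isSome) = true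
      · rw [if_pos hall]
        obtain ⟨⟨hu1, hg1⟩, hs1⟩ : (u'.isSome = true ∧ g'.isSome = true) ∧ s'.isSome = true := by
          simpa [Bool.and_eq_true] using hall
        obtain ⟨a, ha⟩ := Option.isSome_iff_exists.mp hu1
        obtain ⟨b, hb⟩ := Option.isSome_iff_exists.mp hg1
        obtain ⟨c, hc⟩ := Option.isSome_iff_exists.mp hs1
        rw [ha, hb, hc, ← pvScan_full a b c rest, ih]
      · rw [if_neg hall]; exact ih u' g' s'
    rw [hstep, hu', hg', hs', pvSlot, pvSlot, pvSlot]

-- ===== VERDICT (by name: the statement is the Claim_ definition above) =====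
theorem detect_candidates_py_spec : Claim_equal_detect_candidates_py := by
  intro headers _
  show detect_candidates_py headers = detect_candidates_py_alt headers
  simp [detect_candidates_py, detect_candidates_py_alt, pvFindFirst_eq, pvScan_eq]
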